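-- pv_equiv track=rewrite | github.com/ArionDas/python_codes | lab/lab6/reversing_all_numbers.py | reverse_numbers
-- ===== SOURCE A (Python) =====
-- def reverse_numbers(nums):
--     d=0
--     for i in range(len(nums)):
--         r=0
--         j = nums[i]
--         while(j>0):
--             d = j%10
--             r = r*10 + d
--             j //= 10
--         nums[i] = r
--
--     return nums
-- ===== SOURCE B (Python) =====
-- def _rev_dec(n):
--     # positional-weight scan of the decimal string, least significant weight first
--     r, p = 0, 1
--     for ch in str(max(n, 0)):
--         r += (ord(ch) - 48) * p
--         p *= 10
--     return r
--
--
-- def reverse_numbers(nums):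
--     nums[:] = [_rev_dec(n) for n in nums]
--     return nums
-- ===== Notes on version B (the rewrite author's own statement) =====
-- stated objective: alternative
-- what changed: B replaces A's %10-//10 arithmetic while-loop with a single positional-weight scan over the decimal string str(max(n,0)) (no division), rebuilding the list with a comprehension assigned in place via nums[:]; non-positive entries clamp to 0 exactly as A yields 0 for them.
import Mathlib
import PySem

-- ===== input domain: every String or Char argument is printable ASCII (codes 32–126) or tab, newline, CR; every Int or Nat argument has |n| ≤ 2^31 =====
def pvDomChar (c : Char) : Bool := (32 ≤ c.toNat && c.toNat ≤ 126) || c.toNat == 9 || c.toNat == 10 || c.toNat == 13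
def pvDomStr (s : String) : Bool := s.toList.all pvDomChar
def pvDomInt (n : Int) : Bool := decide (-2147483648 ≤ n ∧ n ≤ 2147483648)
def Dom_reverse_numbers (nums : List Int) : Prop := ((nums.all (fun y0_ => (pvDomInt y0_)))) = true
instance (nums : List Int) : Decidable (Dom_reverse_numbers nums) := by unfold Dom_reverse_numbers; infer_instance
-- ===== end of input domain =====

-- B replaces A's %10 // 10 while-loop with a positional-weight scan over the decimal string of
-- max(n, 0) (objective: alternative, same cost). Both A and B mutate `nums` in place in Python
-- (A by index assignment, B by `nums[:] = …`); the theorems below are about the return value.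

-- ===== PORT A =====
-- inner `while j > 0: d = j % 10; r = r*10 + d; j //= 10`
def revLoopA (j r : Int) : Int :=
  if h : 0 < j then
    revLoopA (PySem.Int.floordiv j 10) (r * 10 + PySem.Int.mod j 10)
  else r
termination_by j.toNat
decreasing_by
  have hd : PySem.Int.floordiv j 10 = j / 10 := PySem.Int.floordiv_eq_ediv_of_pos (by omega)
  rw [hd]; omega

-- outer `for i in range(len(nums)): … nums[i] = r`
def reverse_numbers (nums : List Int) : List Int :=
  (PySem.List.pyRange 0 (PySem.List.len nums) 1).foldl
    (fun acc i => PySem.List.pySetD acc i (revLoopA (PySem.List.pyGetD acc i 0) 0)) nums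

-- ===== PORT B =====
-- body of B's inner `for ch in str(max(n, 0)): r += (ord(ch) - 48) * p; p *= 10`
def stepB (rp : Int × Int) (c : Char) : Int × Int :=
  (rp.1 + ((c.toNat : Int) - 48) * rp.2, rp.2 * 10)

def revDec (n : Int) : Int :=
  (((PySem.Int.toStr (max n 0)).toList).foldl stepB (0, 1)).1

def reverse_numbers_alt (nums : List Int) : List Int := nums.map revDec

-- ===== PRECONDITION & SPEC =====
def Spec_reverse_numbers (nums : List Int) (out : List Int) : Prop := out = reverse_numbers_alt nums
instance (nums : List Int) (out : List Int) : Decidable (Spec_reverse_numbers nums out) := by unfold Spec_reverse_numbers; infer_instance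

-- ===== CLAIM (what is proved, stated in full; the proofs are below) =====
def Claim_equal_reverse_numbers : Prop := ∀ (nums : List Int), Dom_reverse_numbers nums → Spec_reverse_numbers nums (reverse_numbers nums)

-- ===== LEMMAS AND PROOFS =====

-- `Nat.toDigitsCore` appends its accumulator on the right
theorem toDigitsCore_accum (b : Nat) : ∀ (f n : Nat) (l : List Char),
    Nat.toDigitsCore b f n l = Nat.toDigitsCore b f n [] ++ l := by
  intro f
  induction f with
  | zero => intro n l; simp [Nat.toDigitsCore]
  | succ f ih =>
    intro n l
    simp only [Nat.toDigitsCore]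
    by_cases h : n / b = 0
    · simp [h]
    · simp only [h, if_false]
      rw [ih (n / b) (Nat.digitChar (n % b) :: l), ih (n / b) [Nat.digitChar (n % b)]]
      simp

-- fuel irrelevance for `Nat.toDigitsCore` (base ≥ 2, enough fuel)
theorem toDigitsCore_fuel (b : Nat) (hb : 2 ≤ b) : ∀ (f g n : Nat), n < f → n < g →
    Nat.toDigitsCore b f n [] = Nat.toDigitsCore b g n [] := by
  intro f
  induction f with
  | zero => intro g n hf; omega
  | succ f ih =>
    intro g n hf hg
    cases g with
    | zero => omega
    | succ g =>
      simp only [Nat.toDigitsCore]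
      by_cases h : n / b = 0
      · simp [h]
      · simp only [h, if_false]
        have hn : 0 < n := by
          rcases Nat.eq_zero_or_pos n with h0 | h0
          · subst h0; simp at h
          · exact h0
        have hlt : n / b < n := Nat.div_lt_self hn (by omega)
        rw [toDigitsCore_accum b f, toDigitsCore_accum b g]
        rw [ih g (n / b) (by omega) (by omega)]

theorem toDigits_small {m : Nat} (h : m < 10) : Nat.toDigits 10 m = [Nat.digitChar m] := by
  have h0 : m / 10 = 0 := Nat.div_eq_of_lt h
  simp [Nat.toDigits, Nat.toDigitsCore, h0, Nat.mod_eq_of_lt h]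

theorem toDigits_large {m : Nat} (h : 10 ≤ m) :
    Nat.toDigits 10 m = Nat.toDigits 10 (m / 10) ++ [Nat.digitChar (m % 10)] := by
  have h0 : m / 10 ≠ 0 := by
    intro h'; omega
  show Nat.toDigitsCore 10 (m + 1) m [] = _
  rw [Nat.toDigitsCore]
  simp only [h0, if_false]
  rw [toDigitsCore_accum 10 m (m / 10)]
  have hfuel : Nat.toDigitsCore 10 m (m / 10) [] = Nat.toDigitsCore 10 (m / 10 + 1) (m / 10) [] :=
    toDigitsCore_fuel 10 (by omega) m (m / 10 + 1) (m / 10)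
      (Nat.div_lt_self (by omega) (by omega)) (by omega)
  rw [hfuel]
  rfl

theorem digitChar_toNat {d : Nat} (h : d < 10) : (Nat.digitChar d).toNat = 48 + d := by
  interval_cases d <;> rfl

-- the code points of `Nat.toDigits 10 m` are 48 + (decimal digits of m, most significant first)
theorem toDigits_map_toNat : ∀ (m : Nat), 0 < m →
    (Nat.toDigits 10 m).map (fun c => c.toNat) = (Nat.digits 10 m).reverse.map (fun d => 48 + d) := by
  intro m
  induction m using Nat.strong_induction_on with
  | _ m ih =>
    intro hm
    by_cases hsmall : m < 10
    · rw [toDigits_small hsmall, Nat.digits_def' (by omega) hm]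
      have hq : m / 10 = 0 := Nat.div_eq_of_lt hsmall
      simp [hq, digitChar_toNat hsmall, Nat.mod_eq_of_lt hsmall]
    · have h10 : 10 ≤ m := by omega
      rw [toDigits_large h10, Nat.digits_def' (by omega) hm]
      have hq : 0 < m / 10 := Nat.div_pos h10 (by omega)
      rw [List.map_append, ih (m / 10) (Nat.div_lt_self hm (by omega)) hq]
      simp [digitChar_toNat (Nat.mod_lt m (by omega))]

-- B's fold computes the little-endian value of the digit string with positional weights
theorem foldB_spec : ∀ (cs : List Char), (∀ c ∈ cs, 48 ≤ c.toNat) → ∀ (r p : Int),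
    cs.foldl stepB (r, p) =
      (r + p * (Nat.ofDigits 10 (cs.map (fun c => c.toNat - 48)) : Nat), p * 10 ^ cs.length) := by
  intro cs
  induction cs with
  | nil => intro _ r p; simp
  | cons c cs ih =>
    intro hcs r p
    have hc : 48 ≤ c.toNat := hcs c (List.mem_cons_self ..)
    rw [List.foldl_cons, ih (fun d hd => hcs d (List.mem_cons_of_mem _ hd))]
    simp only [stepB, List.map_cons, Nat.ofDigits_cons, List.length_cons, Prod.mk.injEq]
    refine ⟨?_, ?_⟩
    · push_cast [Nat.cast_sub hc]
      ring
    · ring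

-- A's loop computes the same value: the base-10 value of the reversed digit list
theorem revLoopA_spec : ∀ (m : Nat) (r : Int),
    revLoopA (m : Int) r =
      r * 10 ^ (Nat.digits 10 m).length + (Nat.ofDigits 10 ((Nat.digits 10 m).reverse) : Nat) := by
  intro m
  induction m using Nat.strong_induction_on with
  | _ m ih =>
    intro r
    rcases Nat.eq_zero_or_pos m with h0 | h0
    · subst h0
      rw [revLoopA]
      simp
    · rw [revLoopA]
      have hpos : (0 : Int) < (m : Int) := by exact_mod_cast h0
      simp only [hpos, dif_pos]
      have hd : PySem.Int.floordiv (m : Int) 10 = ((m / 10 : Nat) : Int) := by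
        exact_mod_cast PySem.Int.floordiv_natCast m 10
      have hmod : PySem.Int.mod (m : Int) 10 = ((m % 10 : Nat) : Int) := by
        exact_mod_cast PySem.Int.mod_natCast m 10
      rw [hd, hmod, ih (m / 10) (Nat.div_lt_self h0 (by omega))]
      rw [Nat.digits_def' (b := 10) (by omega) h0]
      simp only [List.reverse_cons, List.length_cons]
      rw [Nat.ofDigits_append, Nat.ofDigits_singleton, List.length_reverse]
      push_cast
      ring

-- per-element agreement: B's decimal-string scan equals A's arithmetic loop
theorem revDec_eq_revLoopA (n : Int) : revDec n = revLoopA n 0 := by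
  by_cases hn : 0 < n
  · have hmax : max n 0 = n := by omega
    have hne : ¬ n < 0 := by omega
    have hcast : n = ((n.toNat : Nat) : Int) := by omega
    rw [revDec, hmax]
    have hchars : (PySem.Int.toStr n).toList = Nat.toDigits 10 n.toNat := by
      rw [PySem.Int.toList_toStr, PySem.Int.toChars, if_neg hne]
    have hmpos : 0 < n.toNat := by omega
    have hmap := toDigits_map_toNat n.toNat hmpos
    have hge : ∀ c ∈ Nat.toDigits 10 n.toNat, 48 ≤ c.toNat := by
      intro c hc
      have : c.toNat ∈ (Nat.toDigits 10 n.toNat).map (fun c => c.toNat) := List.mem_map_of_mem hc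
      rw [hmap] at this
      rcases List.mem_map.mp this with ⟨d, _, hd⟩
      omega
    have hds : (Nat.toDigits 10 n.toNat).map (fun c => c.toNat - 48) =
        (Nat.digits 10 n.toNat).reverse := by
      have : (Nat.toDigits 10 n.toNat).map (fun c => c.toNat - 48) =
          ((Nat.toDigits 10 n.toNat).map (fun c => c.toNat)).map (fun k => k - 48) := by
        simp [List.map_map]
      rw [this, hmap, List.map_map]
      exact (List.map_congr_left (fun d _ => by simp)).trans (List.map_id _)
    rw [hchars, foldB_spec _ hge, hds]
    rw [hcast, revLoopA_spec]
    simp [hmax]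
  · have hmax : max n 0 = 0 := by omega
    rw [revDec, hmax]
    rw [revLoopA]
    simp only [hn, dif_neg, not_false_iff]
    rw [PySem.Int.toList_toStr]
    decide
  
-- A's index loop over `range(len)` with `nums[i] = g(nums[i])` rewrites the list elementwise
theorem setloop_eq_map (g : Int → Int) : ∀ (post pre : List Int),
    (PySem.List.pyRange (pre.length : Int) ((pre.length : Int) + (post.length : Int)) 1).foldl
      (fun acc i => PySem.List.pySetD acc i (g (PySem.List.pyGetD acc i 0))) (pre.map g ++ post)
      = pre.map g ++ post.map g := by
  intro post
  induction post with
  | nil =>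
    intro pre
    rw [PySem.List.pyRange_one_eq_nil (by simp)]
    simp
  | cons x rest ih =>
    intro pre
    rw [PySem.List.pyRange_one_cons (by push_cast [List.length_cons]; omega)]
    rw [List.foldl_cons]
    have hget : PySem.List.pyGetD (pre.map g ++ x :: rest) (pre.length : Int) 0 = x := by
      rw [PySem.List.pyGetD_natCast]
      rw [List.getD_eq_getElem?_getD]
      rw [show (pre.length : Nat) = (pre.map g).length by simp]
      rw [List.getElem?_append_right (by simp)]
      simp
    have hset : PySem.List.pySetD (pre.map g ++ x :: rest) (pre.length : Int) (g x)
        = (pre ++ [x]).map g ++ rest := by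
      rw [PySem.List.pySetD_natCast]
      rw [show (pre.length : Nat) = (pre.map g).length by simp]
      rw [List.set_append_right _ _ (by omega)]
      simp
    rw [hget, hset]
    have hb1 : ((pre.length : Int) + 1) = (((pre ++ [x]).length : Nat) : Int) := by
      simp
    have hb2 : ((pre.length : Int) + ((x :: rest).length : Int))
        = (((pre ++ [x]).length : Nat) : Int) + ((rest.length : Nat) : Int) := by
      simp; ring
    rw [hb1, hb2, ih (pre ++ [x])]
    simp

-- ===== VERDICT (by name: the statement is the Claim_ definition above) =====
theorem reverse_numbers_spec : Claim_equal_reverse_numbers := by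
  intro nums _
  unfold Spec_reverse_numbers reverse_numbers reverse_numbers_alt
  have h := setloop_eq_map (fun j => revLoopA j 0) nums []
  simp only [List.map_nil, List.nil_append, List.length_nil, Nat.cast_zero, zero_add] at h
  simp only [PySem.List.len_eq]
  rw [h]
  exact List.map_congr_left (fun n _ => (revDec_eq_revLoopA n).symm)
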